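-- pv_equiv track=rewrite | github.com/sid-ip-automatizacion/sid-ip-robot | llenar_assessment.py | convert_var_dict_to_list
-- ===== SOURCE A (Python) =====
-- def convert_var_dict_to_list(match_var_field, val_interfaces):
--     """
--     Transforma las variables definidas en un dicionario con keys VAR_n en la lista de columnas a escribir en excel
--     :param match_var_field: Diccionario donde se relaciona el valor VAR_n con la variable a escribir
--     :param val_interfaces: Diccionario con los valores con keys VAR_n
--     :return: lista con valores de las interfaces a escribir en excel
--     """
--     interf_values = []
--     for curr_int in val_interfaces:
--         int_val = [curr_int.get(match_var_field.get("port")), curr_int.get(match_var_field.get("port_mode")),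
--                    curr_int.get(match_var_field.get("description")), curr_int.get(match_var_field.get("native_vlan")),
--                    curr_int.get(match_var_field.get("tag_vlans")), curr_int.get(match_var_field.get("voice_vlan")),
--                    curr_int.get(match_var_field.get("stp_guard")), curr_int.get(match_var_field.get("poe"))]
--         interf_values.append(int_val)
--
--     return interf_values
-- ===== SOURCE B (Python) =====
-- FIELDS = ("port", "port_mode", "description", "native_vlan", "tag_vlans",
--           "voice_vlan", "stp_guard", "poe")
--
--
-- def convert_var_dict_to_list(match_var_field, val_interfaces):
--     # Inverted index: resolved VAR_n key -> list of output columns it feeds.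
--     pos = {}
--     for idx, field in enumerate(FIELDS):
--         key = match_var_field.get(field)
--         if key is not None:
--             pos.setdefault(key, []).append(idx)
--     rows = []
--     for curr_int in val_interfaces:
--         row = [None] * len(FIELDS)
--         for key, value in curr_int.items():
--             for idx in pos.get(key, ()):
--                 row[idx] = value
--         rows.append(row)
--     return rows
-- ===== Notes on version B (the rewrite author's own statement) =====
-- stated objective: alternative
-- what changed: B inverts the field mapping into a key->columns index built once, then fills each row by scattering the interface dict's items through that index into a preallocated [None]*8 row, instead of A's eight gather-style double lookups per interface.
import Mathlib
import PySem

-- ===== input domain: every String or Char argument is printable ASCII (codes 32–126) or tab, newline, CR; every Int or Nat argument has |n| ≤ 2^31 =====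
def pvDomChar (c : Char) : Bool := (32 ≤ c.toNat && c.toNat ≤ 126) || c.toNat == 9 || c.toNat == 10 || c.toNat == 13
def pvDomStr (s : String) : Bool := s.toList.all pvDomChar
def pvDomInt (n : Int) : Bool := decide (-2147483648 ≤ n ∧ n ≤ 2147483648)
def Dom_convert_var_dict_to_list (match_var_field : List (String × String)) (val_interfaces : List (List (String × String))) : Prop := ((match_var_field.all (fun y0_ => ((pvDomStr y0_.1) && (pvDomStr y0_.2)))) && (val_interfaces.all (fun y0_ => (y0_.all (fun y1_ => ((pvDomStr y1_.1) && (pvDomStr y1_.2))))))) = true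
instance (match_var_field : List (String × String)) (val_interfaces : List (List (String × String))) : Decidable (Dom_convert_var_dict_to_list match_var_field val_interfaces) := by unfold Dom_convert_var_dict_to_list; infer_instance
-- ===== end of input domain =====

-- B builds an inverted key->columns index once and scatters each interface dict's items into a preallocated row, instead of A's eight per-interface gather lookups: alternative algorithm, same cost.


-- ===== PORT A =====
def convert_var_dict_to_list (match_var_field : List (String × String)) (val_interfaces : List (List (String × String))) : List (List (Option String)) :=
  let mvf := PySem.Dict.ofList match_var_field
  val_interfaces.foldl (fun interf_values curr_int =>
    let ci := PySem.Dict.ofList curr_int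
    -- curr_int.get(None) is None in Python (string-keyed dict): Option.bind is exact here
    let int_val := [(mvf.get? "port").bind ci.get?, (mvf.get? "port_mode").bind ci.get?,
                    (mvf.get? "description").bind ci.get?, (mvf.get? "native_vlan").bind ci.get?,
                    (mvf.get? "tag_vlans").bind ci.get?, (mvf.get? "voice_vlan").bind ci.get?,
                    (mvf.get? "stp_guard").bind ci.get?, (mvf.get? "poe").bind ci.get?]
    interf_values ++ [int_val]) []

-- ===== PORT B =====
def pvFields : List String := ["port", "port_mode", "description", "native_vlan", "tag_vlans", "voice_vlan", "stp_guard", "poe"]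

-- 'pos.setdefault(key, []).append(idx)' = modify key with default [] appending idx
def pvBuildPos (m : PySem.Dict String String) : PySem.Dict String (List Int) :=
  (PySem.List.enumerate pvFields 0).foldl (fun pos p =>
    match m.get? p.2 with
    | some key => pos.modify key [] (fun l => l ++ [p.1])
    | none => pos) (PySem.Dict.mk [])

-- 'row = [None]*len(FIELDS); for key, value in curr_int.items(): for idx in pos.get(key, ()): row[idx] = value'
def pvScatterRow (pos : PySem.Dict String (List Int)) (ci : PySem.Dict String String) : List (Option String) :=
  ci.items.foldl (fun row kv =>
    (pos.getD kv.1 []).foldl (fun r idx => PySem.List.pySetD r idx (some kv.2)) row)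
    (List.replicate pvFields.length none)

def convert_var_dict_to_list_alt (match_var_field : List (String × String)) (val_interfaces : List (List (String × String))) : List (List (Option String)) :=
  let pos := pvBuildPos (PySem.Dict.ofList match_var_field)
  val_interfaces.foldl (fun rows curr_int =>
    rows ++ [pvScatterRow pos (PySem.Dict.ofList curr_int)]) []

-- ===== PRECONDITION & SPEC =====
def Spec_convert_var_dict_to_list (match_var_field : List (String × String)) (val_interfaces : List (List (String × String))) (out : List (List (Option String))) : Prop := out = convert_var_dict_to_list_alt match_var_field val_interfaces
instance (match_var_field : List (String × String)) (val_interfaces : List (List (String × String))) (out : List (List (Option String))) : Decidable (Spec_convert_var_dict_to_list match_var_field val_interfaces out) := by unfold Spec_convert_var_dict_to_list; infer_instance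

-- ===== CLAIM (what is proved, stated in full; the proofs are below) =====
def Claim_equal_convert_var_dict_to_list : Prop := ∀ (match_var_field : List (String × String)) (val_interfaces : List (List (String × String))), Dom_convert_var_dict_to_list match_var_field val_interfaces → Spec_convert_var_dict_to_list match_var_field val_interfaces (convert_var_dict_to_list match_var_field val_interfaces)

-- ===== LEMMAS AND PROOFS =====

-- the last value stored for key k in an items list (later items overwrite earlier ones in the scatter fold)
def pvLast (k : String) : List (String × String) → Option String
  | [] => none
  | (k', v) :: rest => match pvLast k rest with
      | some w => some w
      | none => if k' == k then some v else none

theorem pvLast_eq_none_of_not_mem (k : String) (l : List (String × String)) (h : k ∉ l.map Prod.fst) :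
    pvLast k l = none := by
  induction l with
  | nil => rfl
  | cons p rest ih =>
    obtain ⟨k', v⟩ := p
    simp only [List.map_cons, List.mem_cons, not_or] at h
    simp [pvLast, ih h.2, beq_iff_eq, Ne.symm h.1]

-- with unique keys, last match = first match = Dict.get?
theorem pvLast_eq_get? (k : String) (l : List (String × String)) (h : (l.map Prod.fst).Nodup) :
    pvLast k l = (PySem.Dict.mk l).get? k := by
  induction l with
  | nil => simp [pvLast, PySem.Dict.get?]
  | cons p rest ih =>
    obtain ⟨k', v⟩ := p
    simp only [List.map_cons, List.nodup_cons] at h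
    rw [PySem.Dict.get?_mk_cons, pvLast]
    by_cases hk : k' = k
    · subst hk
      rw [pvLast_eq_none_of_not_mem k' rest h.1]
      simp
    · simp only [beq_iff_eq, hk, if_false, ← ih h.2]
      cases pvLast k rest <;> simp

-- characterization of the inverted index: the fold step, generalized over the enumerated list
theorem pv_mem_buildPos_aux (m : PySem.Dict String String) (l : List (Int × String))
    (pos : PySem.Dict String (List Int)) (k : String) (j : Int) :
    j ∈ (l.foldl (fun pos p =>
        match m.get? p.2 with
        | some key => pos.modify key [] (fun l => l ++ [p.1])
        | none => pos) pos).getD k []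
      ↔ j ∈ pos.getD k [] ∨ ∃ f, (j, f) ∈ l ∧ m.get? f = some k := by
  induction l generalizing pos with
  | nil => simp
  | cons p rest ih =>
    obtain ⟨i, f⟩ := p
    simp only [List.foldl_cons]
    cases hm : m.get? f with
    | none =>
      rw [ih]
      constructor
      · rintro (h | ⟨g, hg, hgk⟩)
        · exact Or.inl h
        · exact Or.inr ⟨g, List.mem_cons_of_mem _ hg, hgk⟩
      · rintro (h | ⟨g, hg, hgk⟩)
        · exact Or.inl h
        · rcases List.mem_cons.mp hg with h1 | h1
          · exfalso
            rw [Prod.mk.injEq] at h1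
            obtain ⟨rfl, rfl⟩ := h1
            simp [hm] at hgk
          · exact Or.inr ⟨g, h1, hgk⟩
    | some key =>
      rw [ih, PySem.Dict.getD_modify]
      by_cases hk : k = key
      · subst hk
        rw [if_pos rfl]
        constructor
        · rintro (h | ⟨g, hg, hgk⟩)
          · rcases List.mem_append.mp h with h1 | h1
            · exact Or.inl h1
            · rw [List.mem_singleton] at h1
              subst h1
              exact Or.inr ⟨f, List.mem_cons_self .., hm⟩
          · exact Or.inr ⟨g, List.mem_cons_of_mem _ hg, hgk⟩
        · rintro (h | ⟨g, hg, hgk⟩)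
          · exact Or.inl (List.mem_append.mpr (Or.inl h))
          · rcases List.mem_cons.mp hg with h1 | h1
            · rw [Prod.mk.injEq] at h1
              obtain ⟨rfl, rfl⟩ := h1
              exact Or.inl (List.mem_append.mpr (Or.inr (List.mem_singleton.mpr rfl)))
            · exact Or.inr ⟨g, h1, hgk⟩
      · rw [if_neg hk]
        constructor
        · rintro (h | ⟨g, hg, hgk⟩)
          · exact Or.inl h
          · exact Or.inr ⟨g, List.mem_cons_of_mem _ hg, hgk⟩
        · rintro (h | ⟨g, hg, hgk⟩)
          · exact Or.inl h
          · rcases List.mem_cons.mp hg with h1 | h1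
            · exfalso
              rw [Prod.mk.injEq] at h1
              obtain ⟨rfl, rfl⟩ := h1
              rw [hm] at hgk
              exact hk (Option.some.inj hgk).symm
            · exact Or.inr ⟨g, h1, hgk⟩

theorem pv_mem_buildPos (m : PySem.Dict String String) (k : String) (j : Int) :
    j ∈ (pvBuildPos m).getD k [] ↔ ∃ n : Nat, j = (n : Int) ∧ pvFields[n]?.bind m.get? = some k := by
  unfold pvBuildPos
  rw [pv_mem_buildPos_aux]
  simp only [PySem.Dict.getD, PySem.Dict.get?, List.find?_nil, Option.map_none, Option.getD_none,
    List.not_mem_nil, false_or]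
  constructor
  · rintro ⟨f, hf, hfk⟩
    rw [PySem.List.mem_enumerate_iff] at hf
    obtain ⟨n, hn, hp⟩ := hf
    rw [Prod.mk.injEq] at hp
    obtain ⟨rfl, rfl⟩ := hp
    exact ⟨n, by omega, by simp [List.getElem?_eq_getElem hn, hfk]⟩
  · rintro ⟨n, rfl, hk⟩
    have hn : n < pvFields.length := by
      by_contra hge
      rw [List.getElem?_eq_none (by omega)] at hk
      simp at hk
    refine ⟨pvFields[n], ?_, ?_⟩
    · rw [PySem.List.mem_enumerate_iff]
      exact ⟨n, hn, by simp⟩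
    · rwa [List.getElem?_eq_getElem hn] at hk

-- inner scatter: writing value v at every index of the bucket
theorem pv_inner_length (bucket : List Int) (r : List (Option String)) (v : Option String) :
    (bucket.foldl (fun r idx => PySem.List.pySetD r idx v) r).length = r.length := by
  induction bucket generalizing r with
  | nil => rfl
  | cons i rest ih => simp [List.foldl_cons, ih, PySem.List.length_pySetD]

theorem pv_inner_get (bucket : List Int) (r : List (Option String)) (v : Option String) (n : Nat)
    (hb : ∀ i ∈ bucket, 0 ≤ i) (hn : n < r.length) :
    (bucket.foldl (fun r idx => PySem.List.pySetD r idx v) r)[n]? =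
      if (n : Int) ∈ bucket then some v else r[n]? := by
  induction bucket generalizing r with
  | nil => simp [List.getElem?_eq_getElem hn]
  | cons i rest ih =>
    have hi : 0 ≤ i := hb i (List.mem_cons_self ..)
    have hstep : PySem.List.pySetD r i v = r.set i.toNat v := PySem.List.pySetD_of_nonneg r v hi
    have hlen : (r.set i.toNat v).length = r.length := by simp
    rw [List.foldl_cons, hstep, ih _ (fun x hx => hb x (List.mem_cons_of_mem _ hx)) (by omega)]
    by_cases hmem : (n : Int) ∈ rest
    · rw [if_pos hmem, if_pos (List.mem_cons_of_mem _ hmem)]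
    · rw [if_neg hmem]
      by_cases hin : i = (n : Int)
      · have ht : i.toNat = n := by omega
        rw [if_pos (List.mem_cons.mpr (Or.inl hin.symm)), ht]
        simp [hn]
      · have hin' : ¬((n : Int) = i) := fun h => hin h.symm
        have hne : i.toNat ≠ n := by omega
        rw [if_neg (by simp [List.mem_cons, hin', hmem]), List.getElem?_set_ne hne]

-- outer scatter: column n of the scattered row is the last value stored for the key that feeds column n
theorem pv_outer_get (m : PySem.Dict String String) (items : List (String × String))
    (r : List (Option String)) (n : Nat) (hn : n < r.length) (hr : r.length = pvFields.length) :
    (items.foldl (fun row kv =>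
        ((pvBuildPos m).getD kv.1 []).foldl (fun r idx => PySem.List.pySetD r idx (some kv.2)) row) r)[n]? =
      match pvFields[n]?.bind m.get? with
      | some k => match pvLast k items with
          | some w => some (some w)
          | none => r[n]?
      | none => r[n]? := by
  induction items generalizing r with
  | nil =>
    cases h : pvFields[n]?.bind m.get? with
    | none => rfl
    | some k => simp [pvLast]
  | cons kv rest ih =>
    obtain ⟨k', v⟩ := kv
    simp only [List.foldl_cons]
    have hb : ∀ i ∈ (pvBuildPos m).getD k' [], 0 ≤ i := by
      intro i hi
      rw [pv_mem_buildPos] at hi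
      obtain ⟨nn, rfl, _⟩ := hi
      exact Int.natCast_nonneg nn
    have hlen : (((pvBuildPos m).getD k' []).foldl
        (fun r idx => PySem.List.pySetD r idx (some v)) r).length = r.length :=
      pv_inner_length _ _ _
    rw [ih _ (by omega) (by omega)]
    have hstep : (((pvBuildPos m).getD k' []).foldl
        (fun r idx => PySem.List.pySetD r idx (some v)) r)[n]? =
        if pvFields[n]?.bind m.get? = some k' then some (some v) else r[n]? := by
      rw [pv_inner_get _ _ _ _ hb hn]
      congr 1
      rw [pv_mem_buildPos]
      simp only [eq_iff_iff]
      constructor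
      · rintro ⟨nn, hnn, h⟩
        rwa [(by exact_mod_cast hnn : n = nn)]
      · intro h; exact ⟨n, rfl, h⟩
    cases hkey : pvFields[n]?.bind m.get? with
    | none =>
      rw [hkey] at hstep
      simp only [reduceCtorEq] at hstep
      rw [hstep]
      simp
    | some k =>
      rw [hkey] at hstep
      cases hrest : pvLast k rest with
      | some w => simp [pvLast, hrest]
      | none =>
        rw [hstep]
        simp only [pvLast, hrest]
        by_cases hk : k' = k
        · subst hk; simp
        · simp [Option.some.injEq, Ne.symm hk, beq_iff_eq, hk]

-- per-interface: the scattered row equals A's gathered row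
theorem pv_row (m : PySem.Dict String String) (ci : List (String × String)) :
    pvScatterRow (pvBuildPos m) (PySem.Dict.ofList ci) =
      pvFields.map (fun f => (m.get? f).bind (PySem.Dict.ofList ci).get?) := by
  have hnodup : ((PySem.Dict.ofList ci).items.map Prod.fst).Nodup := PySem.Dict.nodup_keys_ofList ci
  apply List.ext_getElem?
  intro n
  by_cases hn : n < pvFields.length
  · have hrep : n < (List.replicate pvFields.length (none : Option String)).length := by
      simpa using hn
    unfold pvScatterRow
    rw [pv_outer_get m _ _ n hrep (by simp)]
    have hmk : PySem.Dict.mk (PySem.Dict.ofList ci).items = PySem.Dict.ofList ci := rfl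
    have hlast : ∀ k, pvLast k (PySem.Dict.ofList ci).items = (PySem.Dict.ofList ci).get? k := by
      intro k; rw [pvLast_eq_get? k _ hnodup, hmk]
    rw [List.getElem?_map, List.getElem?_eq_getElem hn]
    simp only [Option.map_some, List.getElem?_eq_getElem hn, Option.bind_some]
    cases hkey : m.get? pvFields[n] with
    | none =>
      simp [hkey, List.getElem?_replicate, hn]
    | some k =>
      cases h : (PySem.Dict.ofList ci).get? k <;>
        simp [hlast, h, List.getElem?_replicate, hn]
  · have h1 : (pvScatterRow (pvBuildPos m) (PySem.Dict.ofList ci)).length = pvFields.length := by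
      unfold pvScatterRow
      have hfold : ∀ (items : List (String × String)) (r : List (Option String)),
          (items.foldl (fun row kv =>
            ((pvBuildPos m).getD kv.1 []).foldl (fun r idx => PySem.List.pySetD r idx (some kv.2)) row) r).length
            = r.length := by
        intro items
        induction items with
        | nil => intro r; rfl
        | cons kv rest ih => intro r; rw [List.foldl_cons, ih, pv_inner_length]
      rw [hfold]; simp
    rw [List.getElem?_eq_none (by omega), List.getElem?_eq_none (by simpa [h1] using hn)]

-- ===== VERDICT (by name: the statement is the Claim_ definition above) =====
theorem convert_var_dict_to_list_spec : Claim_equal_convert_var_dict_to_list := by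
  intro mvf vi _
  unfold Spec_convert_var_dict_to_list convert_var_dict_to_list convert_var_dict_to_list_alt
  rw [PySem.List.foldl_append_singleton_eq_map, PySem.List.foldl_append_singleton_eq_map]
  simp only [List.nil_append]
  apply List.map_congr_left
  intro ci _
  rw [pv_row]
  rfl
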